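-- pv_equiv track=rewrite | github.com/gracelefevre/paradigm-shape | MaximallyConfusableSubsets_Deidentified.py | GetThemes
-- ===== SOURCE A (Python) =====
-- cache = {}
--
-- def EditDistanceWithAlignment(s1, s2, level=0):
--     if(len(s1)==0):
--         return len(s2), set([
--             (tuple(), tuple([(char, False) for char in s2]))
--             ])
--     if(len(s2)==0):
--         return len(s1), set([
--             (tuple([(char, False) for char in s1]), tuple())
--             ])
--     if(s1, s2) in cache:
--         return cache[(s1, s2)]
--
--     if(s1[-1]==s2[-1]):
--         cost = 0
--     else:
--         cost = 2
--
--     op1, solutions1 = EditDistanceWithAlignment(s1[:-1], s2, level=level + 1)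
--     op2, solutions2 = EditDistanceWithAlignment(s1, s2[:-1], level=level + 1)
--     op3, solutions3 = EditDistanceWithAlignment(s1[:-1], s2[:-1], level=level + 1)
--
--     op1 += 1
--     op2 += 1
--     op3 += cost
--
--     solutions = set()
--     mincost = min(op1, op2, op3)
--
--     if op1==mincost:
--         for (sol1, sol2) in solutions1:
--             solutions.add( (sol1 + ((s1[-1], False),), sol2) )
--     if op2==mincost:
--         for (sol1, sol2) in solutions2:
--             solutions.add( (sol1, sol2 + ((s2[-1], False),)) )
--     if op3==mincost and cost==0:
--         for (sol1, sol2) in solutions3: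
--             solutions.add( (sol1 + ((s1[-1], True),), sol2 + ((s2[-1], True),)) )
--     if op3==mincost and cost>0:
--         for (sol1, sol2) in solutions3:
--             solutions.add( (sol1 + ((s1[-1], False),), sol2 + ((s2[-1], False),)) )
--     cache[(s1, s2)] = (mincost, solutions)
--
--     return mincost, solutions
--
-- def GetThemes(dist, form):
--     mincost, solutions = EditDistanceWithAlignment(dist, form)
--     alignments = []
--     themes = set()
--
--     for ix, sol in enumerate(solutions):
--         for ix2, al in enumerate(sol):
--             alignments.append(al)
--
--     for i in range(1, len(alignments), 2):
--         theme = []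
--         for (char, alt) in alignments[i]:
--             if alt==False:
--                 theme.append(char)
--         themes.add("".join(theme))
--
--     return(themes)
-- ===== SOURCE B (Python) =====
-- def GetThemes(dist, form):
--     # DP over prefix lengths, keeping per cell only the deduplicated list of
--     # form-side unaligned-character strings (no alignments are materialized).
--     memo = {}
--
--     def go(i, j):
--         # (optimal cost, first-occurrence-deduplicated theme strings) for dist[:i] vs form[:j]
--         if i == 0:
--             return j, [form[:j]]
--         if j == 0:
--             return i, [""]
--         if (i, j) in memo:
--             return memo[(i, j)]
--         cost = 0 if dist[i - 1] == form[j - 1] else 2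
--         op1, t1 = go(i - 1, j)
--         op2, t2 = go(i, j - 1)
--         op3, t3 = go(i - 1, j - 1)
--         op1 += 1
--         op2 += 1
--         op3 += cost
--         d = min(op1, op2, op3)
--         out = []
--         seen = set()
--         if op1 == d:
--             for t in t1:
--                 if t not in seen:
--                     seen.add(t)
--                     out.append(t)
--         if op2 == d:
--             for t in t2:
--                 u = t + form[j - 1]
--                 if u not in seen:
--                     seen.add(u)
--                     out.append(u)
--         if op3 == d and cost == 0:
--             for t in t3:
--                 if t not in seen:
--                     seen.add(t)
--                     out.append(t)
--         if op3 == d and cost > 0: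
--             for t in t3:
--                 u = t + form[j - 1]
--                 if u not in seen:
--                     seen.add(u)
--                     out.append(u)
--         memo[(i, j)] = (d, out)
--         return d, out
--
--     return set(go(len(dist), len(form))[1])
-- ===== Notes on version B (the rewrite author's own statement) =====
-- stated objective: alternative
-- what changed: B replaces A's recursion that materializes the full set of optimal alignment pairs (plus the post-processing that flattens them and reads the odd positions) by an index-based edit-distance DP that keeps, per cell, only the first-occurrence-deduplicated list of form-side unaligned-character strings.
import Mathlib
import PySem

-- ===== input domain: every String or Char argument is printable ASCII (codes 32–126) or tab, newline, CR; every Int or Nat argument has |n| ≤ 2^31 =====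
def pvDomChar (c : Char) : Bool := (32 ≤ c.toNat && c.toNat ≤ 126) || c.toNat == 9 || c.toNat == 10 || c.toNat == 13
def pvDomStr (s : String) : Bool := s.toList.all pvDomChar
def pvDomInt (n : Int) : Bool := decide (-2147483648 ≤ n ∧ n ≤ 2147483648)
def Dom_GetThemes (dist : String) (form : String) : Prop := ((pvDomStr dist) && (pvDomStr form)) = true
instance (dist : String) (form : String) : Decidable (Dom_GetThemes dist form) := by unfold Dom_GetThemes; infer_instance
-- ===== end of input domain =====

-- B re-implements GetThemes as a prefix-index DP that keeps, per cell, only the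
-- deduplicated list of form-side unaligned-character strings (A materializes every
-- optimal alignment); return values agree, A's module-level cache is a pure memo.

-- ===== PORT A =====
-- EditDistanceWithAlignment, ported without its cache (the memo is pure, so the
-- cached function computes the same value); s1[:-1] = dropLast, s1[-1] = getLast.
def pvEdA : List Char → List Char → Int × List (List (Char × Bool) × List (Char × Bool))
  | l1, l2 =>
    if h1 : l1 = [] then ((l2.length : Int), [([], l2.map (fun c => (c, false)))])
    else if h2 : l2 = [] then ((l1.length : Int), [(l1.map (fun c => (c, false)), [])])
    else
      let cost : Int := if l1.getLast h1 = l2.getLast h2 then 0 else 2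
      let r1 := pvEdA l1.dropLast l2
      let r2 := pvEdA l1 l2.dropLast
      let r3 := pvEdA l1.dropLast l2.dropLast
      let op1 := r1.1 + 1
      let op2 := r2.1 + 1
      let op3 := r3.1 + cost
      let mincost := min (min op1 op2) op3
      let s0 : PySem.Set (List (Char × Bool) × List (Char × Bool)) := PySem.Set.empty
      let s1 := if op1 = mincost then
          r1.2.foldl (fun s p => PySem.Set.add s (p.1 ++ [(l1.getLast h1, false)], p.2)) s0 else s0
      let s2 := if op2 = mincost then
          r2.2.foldl (fun s p => PySem.Set.add s (p.1, p.2 ++ [(l2.getLast h2, false)])) s1 else s1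
      let s3 := if op3 = mincost ∧ cost = 0 then
          r3.2.foldl (fun s p => PySem.Set.add s (p.1 ++ [(l1.getLast h1, true)], p.2 ++ [(l2.getLast h2, true)])) s2 else s2
      let s4 := if op3 = mincost ∧ cost > 0 then
          r3.2.foldl (fun s p => PySem.Set.add s (p.1 ++ [(l1.getLast h1, false)], p.2 ++ [(l2.getLast h2, false)])) s3 else s3
      (mincost, s4)
  termination_by l1 l2 => l1.length + l2.length
  decreasing_by
    all_goals
      have e1 : l1 ≠ [] := h1
      have e2 : l2 ≠ [] := h2
      have p1 := List.length_pos_of_ne_nil e1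
      have p2 := List.length_pos_of_ne_nil e2
      simp [List.length_dropLast]; omega

def GetThemes (dist : String) (form : String) : List String :=
  let r := pvEdA dist.toList form.toList
  let alignments := r.2.foldl (fun acc sol => (acc ++ [sol.1]) ++ [sol.2]) []
  (PySem.List.pyRange 1 (PySem.List.len alignments) 2).foldl
    (fun themes i =>
      -- alignments[i]: range(1, len, 2) keeps i in range, so the default is never read
      let al := PySem.List.pyGetD alignments i []
      let theme := al.foldl (fun th cb => if cb.2 == false then th ++ [cb.1] else th) ([] : List Char)
      PySem.Set.add themes (String.ofList theme))
    PySem.Set.empty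

-- ===== PORT B =====
-- go(i, j) of Source B, ported without its (pure) memo; the out/seen pair is exactly a
-- PySem.Set built by add.  dist[i-1]/form[j-1] = getD (exact: go is only called with
-- 1 ≤ i ≤ len dist, 1 ≤ j ≤ len form when it reads them).
def pvGoB (d f : List Char) (i j : Nat) : Int × List String :=
  if i = 0 then ((j : Int), [String.ofList (f.take j)])
  else if j = 0 then ((i : Int), [""])
  else
    let cost : Int := if d.getD (i-1) ' ' = f.getD (j-1) ' ' then 0 else 2
    let r1 := pvGoB d f (i-1) j
    let r2 := pvGoB d f i (j-1)
    let r3 := pvGoB d f (i-1) (j-1)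
    let op1 := r1.1 + 1
    let op2 := r2.1 + 1
    let op3 := r3.1 + cost
    let dmin := min (min op1 op2) op3
    let t0 : PySem.Set String := PySem.Set.empty
    let t1 := if op1 = dmin then r1.2.foldl (fun s t => PySem.Set.add s t) t0 else t0
    let t2 := if op2 = dmin then r2.2.foldl (fun s t => PySem.Set.add s (t.push (f.getD (j-1) ' '))) t1 else t1
    let t3 := if op3 = dmin ∧ cost = 0 then r3.2.foldl (fun s t => PySem.Set.add s t) t2 else t2
    let t4 := if op3 = dmin ∧ cost > 0 then r3.2.foldl (fun s t => PySem.Set.add s (t.push (f.getD (j-1) ' '))) t3 else t3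
    (dmin, t4)
  termination_by i + j
  decreasing_by all_goals omega

def GetThemes_alt (dist : String) (form : String) : List String :=
  PySem.Set.ofList (pvGoB dist.toList form.toList dist.toList.length form.toList.length).2

-- ===== PRECONDITION & SPEC =====
def Spec_GetThemes (dist : String) (form : String) (out : List String) : Prop := out = GetThemes_alt dist form
instance (dist : String) (form : String) (out : List String) : Decidable (Spec_GetThemes dist form out) := by unfold Spec_GetThemes; infer_instance

-- ===== CLAIM (what is proved, stated in full; the proofs are below) =====
def Claim_equal_GetThemes : Prop := ∀ (dist : String) (form : String), Dom_GetThemes dist form → Spec_GetThemes dist form (GetThemes dist form)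

-- ===== LEMMAS AND PROOFS =====

-- the form-side theme string of one alignment pair
def pvTheme (p : List (Char × Bool) × List (Char × Bool)) : String :=
  String.ofList ((p.2.filter (fun cb => cb.2 == false)).map Prod.fst)

-- updating a set with the image of a dedup is updating it with the image of the list
theorem pv_update_map_ofList {α β : Type} [BEq α] [LawfulBEq α] [BEq β] [LawfulBEq β]
    (s : PySem.Set β) (h : α → β) (xs : List α) :
    PySem.Set.update s ((PySem.Set.ofList xs).map h) = PySem.Set.update s (xs.map h) := by
  induction xs using List.reverseRecOn with
  | nil => rfl
  | append_singleton xs x ih =>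
    rw [PySem.Set.ofList_append_singleton, List.map_append, PySem.Set.update_append]
    by_cases hx : x ∈ xs
    · rw [PySem.Set.add_of_mem (by simpa [PySem.Set.mem_ofList] using hx)]
      rw [ih]
      simp only [List.map_cons, List.map_nil, PySem.Set.update_cons, PySem.Set.update_nil]
      rw [PySem.Set.add_of_mem]
      rw [PySem.Set.mem_update]
      exact Or.inr (List.mem_map_of_mem hx)
    · rw [PySem.Set.add_of_not_mem (by simpa [PySem.Set.mem_ofList] using hx)]
      rw [List.map_append, PySem.Set.update_append, ih]

-- mapping a set update through φ
theorem pv_ofList_map_update {α β : Type} [BEq α] [LawfulBEq α] [BEq β] [LawfulBEq β]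
    (φ : α → β) (E L : List α) :
    PySem.Set.ofList ((PySem.Set.update E L).map φ) =
      PySem.Set.update (PySem.Set.ofList (E.map φ)) (L.map φ) := by
  induction L generalizing E with
  | nil => simp [PySem.Set.update_nil]
  | cons x L ih =>
    rw [PySem.Set.update_cons, List.map_cons, PySem.Set.update_cons]
    by_cases hx : x ∈ E
    · rw [PySem.Set.add_of_mem hx,
          PySem.Set.add_of_mem (by simpa [PySem.Set.mem_ofList] using List.mem_map_of_mem (f := φ) hx), ih]
    · rw [PySem.Set.add_of_not_mem hx, ih, List.map_append]
      simp only [List.map_cons, List.map_nil, PySem.Set.ofList_append_singleton]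

-- one accumulation branch: folding h over the deduplicated themes of S equals
-- the themes of folding g over S, whenever pvTheme (g p) = h (pvTheme p)
theorem pv_branch (g : (List (Char × Bool) × List (Char × Bool)) → (List (Char × Bool) × List (Char × Bool)))
    (h : String → String) (hgh : ∀ p, pvTheme (g p) = h (pvTheme p))
    (E : List (List (Char × Bool) × List (Char × Bool)))
    (S : List (List (Char × Bool) × List (Char × Bool))) :
    List.foldl (fun s t => PySem.Set.add s (h t)) (PySem.Set.ofList (E.map pvTheme))
        (PySem.Set.ofList (S.map pvTheme)) =
      PySem.Set.ofList ((List.foldl (fun s p => PySem.Set.add s (g p)) E S).map pvTheme) := by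
  rw [← PySem.Set.update_map_eq_foldl_add, ← PySem.Set.update_map_eq_foldl_add,
      pv_update_map_ofList]
  have hmaps : List.map h (List.map pvTheme S) = List.map pvTheme (List.map g S) := by
    simp only [List.map_map]
    exact List.map_congr_left (fun p _ => (hgh p).symm)
  rw [hmaps, ← pv_ofList_map_update, PySem.Set.update_map_eq_foldl_add]

-- main invariant: B's DP cell (i, j) carries A's optimal cost and the
-- first-occurrence dedup of the themes of A's optimal alignments of the prefixes
theorem pvGoB_eq (d f : List Char) (N i j : Nat) (hN : i + j ≤ N)
    (hi : i ≤ d.length) (hj : j ≤ f.length) :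
    pvGoB d f i j = ((pvEdA (d.take i) (f.take j)).1,
      PySem.Set.ofList ((pvEdA (d.take i) (f.take j)).2.map pvTheme)) := by
  induction N generalizing i j with
  | zero =>
    have hi0 : i = 0 := by omega
    have hj0 : j = 0 := by omega
    subst hi0; subst hj0
    rw [pvGoB, pvEdA]
    simp [pvTheme, PySem.Set.ofList_eq_self_of_nodup]
  | succ N ihN =>
    by_cases hi0 : i = 0
    · subst hi0
      rw [pvGoB, pvEdA]
      simp [pvTheme, List.length_take, min_eq_left hj,
            PySem.Set.ofList_eq_self_of_nodup]
      congr 1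
      rw [← List.map_take, List.filter_map]
      simp [Function.comp_def]
    · by_cases hj0 : j = 0
      · subst hj0
        rw [pvGoB, pvEdA]
        have hne : d.take i ≠ [] := by
          apply List.ne_nil_of_length_pos
          simp [List.length_take]; omega
        rw [dif_neg hne]
        simp [pvTheme, List.length_take, min_eq_left hi, hi0,
              PySem.Set.ofList_eq_self_of_nodup]
      · -- main step: i ≠ 0, j ≠ 0
        have hi1 : 1 ≤ i := Nat.one_le_iff_ne_zero.mpr hi0
        have hj1 : 1 ≤ j := Nat.one_le_iff_ne_zero.mpr hj0
        have hne1 : d.take i ≠ [] := by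
          apply List.ne_nil_of_length_pos; simp [List.length_take]; omega
        have hne2 : f.take j ≠ [] := by
          apply List.ne_nil_of_length_pos; simp [List.length_take]; omega
        have hdl1 : (d.take i).dropLast = d.take (i-1) := by
          rw [List.dropLast_eq_take, List.take_take]
          congr 1
          simp [List.length_take]
          omega
        have hdl2 : (f.take j).dropLast = f.take (j-1) := by
          rw [List.dropLast_eq_take, List.take_take]
          congr 1
          simp [List.length_take]
          omega
        have hlt1 : i - 1 < d.length := by omega
        have hlt2 : j - 1 < f.length := by omega
        have hgl1 : (d.take i).getLast hne1 = d.getD (i-1) ' ' := by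
          simp [List.getLast_eq_getElem, List.length_take, min_eq_left hi, List.getElem_take,
                List.getD_eq_getElem?_getD, List.getElem?_eq_getElem hlt1]
        have hgl2 : (f.take j).getLast hne2 = f.getD (j-1) ' ' := by
          simp [List.getLast_eq_getElem, List.length_take, min_eq_left hj, List.getElem_take,
                List.getD_eq_getElem?_getD, List.getElem?_eq_getElem hlt2]
        rw [pvGoB, if_neg hi0, if_neg hj0]
        rw [pvEdA, dif_neg hne1, dif_neg hne2]
        rw [hdl1, hdl2, hgl1, hgl2]
        rw [ihN (i-1) j (by omega) (by omega) hj,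
            ihN i (j-1) (by omega) hi (by omega),
            ihN (i-1) (j-1) (by omega) (by omega) (by omega)]
        dsimp only
        simp only [Prod.mk.injEq]
        refine ⟨trivial, ?_⟩
        have hpush : ∀ (l : List Char) (c : Char),
            (String.ofList l).push c = String.ofList (l ++ [c]) := by
          intro l c
          apply String.toList_inj.mp
          simp
        have hB1 : ∀ (E : List (List (Char × Bool) × List (Char × Bool))),
            List.foldl (fun s t => PySem.Set.add s t)
              (PySem.Set.ofList (E.map pvTheme))
              (PySem.Set.ofList ((pvEdA (List.take (i-1) d) (List.take j f)).2.map pvTheme)) =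
            PySem.Set.ofList ((List.foldl
              (fun s p => PySem.Set.add s (p.1 ++ [(d.getD (i-1) ' ', false)], p.2)) E
              (pvEdA (List.take (i-1) d) (List.take j f)).2).map pvTheme) :=
          fun E => pv_branch _ (fun t => t) (by intro p; simp [pvTheme]) E _
        have hB2 : ∀ (E : List (List (Char × Bool) × List (Char × Bool))),
            List.foldl (fun s t => PySem.Set.add s (t.push (f.getD (j-1) ' ')))
              (PySem.Set.ofList (E.map pvTheme))
              (PySem.Set.ofList ((pvEdA (List.take i d) (List.take (j-1) f)).2.map pvTheme)) =
            PySem.Set.ofList ((List.foldl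
              (fun s p => PySem.Set.add s (p.1, p.2 ++ [(f.getD (j-1) ' ', false)])) E
              (pvEdA (List.take i d) (List.take (j-1) f)).2).map pvTheme) :=
          fun E => pv_branch _ (fun t => t.push (f.getD (j-1) ' '))
            (by intro p; simp [pvTheme, hpush, List.filter_append]) E _
        have hB3 : ∀ (E : List (List (Char × Bool) × List (Char × Bool))),
            List.foldl (fun s t => PySem.Set.add s t)
              (PySem.Set.ofList (E.map pvTheme))
              (PySem.Set.ofList ((pvEdA (List.take (i-1) d) (List.take (j-1) f)).2.map pvTheme)) =
            PySem.Set.ofList ((List.foldl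
              (fun s p => PySem.Set.add s
                (p.1 ++ [(d.getD (i-1) ' ', true)], p.2 ++ [(f.getD (j-1) ' ', true)])) E
              (pvEdA (List.take (i-1) d) (List.take (j-1) f)).2).map pvTheme) :=
          fun E => pv_branch _ (fun t => t)
            (by intro p; simp [pvTheme, List.filter_append]) E _
        have hB4 : ∀ (E : List (List (Char × Bool) × List (Char × Bool))),
            List.foldl (fun s t => PySem.Set.add s (t.push (f.getD (j-1) ' ')))
              (PySem.Set.ofList (E.map pvTheme))
              (PySem.Set.ofList ((pvEdA (List.take (i-1) d) (List.take (j-1) f)).2.map pvTheme)) =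
            PySem.Set.ofList ((List.foldl
              (fun s p => PySem.Set.add s
                (p.1 ++ [(d.getD (i-1) ' ', false)], p.2 ++ [(f.getD (j-1) ' ', false)])) E
              (pvEdA (List.take (i-1) d) (List.take (j-1) f)).2).map pvTheme) :=
          fun E => pv_branch _ (fun t => t.push (f.getD (j-1) ' '))
            (by intro p; simp [pvTheme, hpush, List.filter_append]) E _
        have h0 : (PySem.Set.empty : PySem.Set String) =
            PySem.Set.ofList (List.map pvTheme
              ([] : List (List (Char × Bool) × List (Char × Bool)))) := rfl
        split_ifs <;>
          (try rw [h0]) <;> (try rw [hB1]) <;> (try rw [hB2]) <;> (try rw [hB3]) <;>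
          (try rw [hB4]) <;> (try rfl)

-- A's post-processing (flatten the pairs, then read the odd positions) collects
-- exactly the themes of the solutions, in order
theorem pv_postprocess (sols : List (List (Char × Bool) × List (Char × Bool))) (init : PySem.Set String) :
    (PySem.List.pyRange 1 (PySem.List.len (sols.foldl (fun acc sol => (acc ++ [sol.1]) ++ [sol.2]) [])) 2).foldl
      (fun themes i =>
        let al := PySem.List.pyGetD (sols.foldl (fun acc sol => (acc ++ [sol.1]) ++ [sol.2]) []) i []
        let theme := al.foldl (fun th cb => if cb.2 == false then th ++ [cb.1] else th) ([] : List Char)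
        PySem.Set.add themes (String.ofList theme))
      init =
    PySem.Set.update init (sols.map pvTheme) := by
  have halign : ∀ (ss : List (List (Char × Bool) × List (Char × Bool))),
      ss.foldl (fun acc sol => (acc ++ [sol.1]) ++ [sol.2]) ([] : List (List (Char × Bool))) =
        ss.flatMap (fun p => [p.1, p.2]) := by
    intro ss
    have h1 := PySem.List.foldl_congr_mem (l := ss)
      (init := ([] : List (List (Char × Bool))))
      (f := fun acc sol => (acc ++ [sol.1]) ++ [sol.2])
      (g := fun acc sol => acc ++ [sol.1, sol.2])
      (by intro acc x _; simp)
    rw [h1, PySem.List.foldl_append_eq_flatMap]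
    simp
  rw [halign]
  induction sols using List.reverseRecOn with
  | nil =>
    simp [PySem.List.len_eq, PySem.List.pyRange_of_pos (1 : Int) 0 (by norm_num : (0:Int) < 2),
          PySem.Set.update_nil]
  | append_singleton sols p ih =>
    have hlenAll : ∀ (ss : List (List (Char × Bool) × List (Char × Bool))),
        (ss.flatMap (fun p => [p.1, p.2])).length = 2 * ss.length := by
      intro ss
      induction ss with
      | nil => rfl
      | cons q t iht =>
        simp only [List.flatMap_cons, List.length_append, List.length_cons, List.length_nil, iht]
        omega
    have hlen := hlenAll sols
    have hflat : (sols ++ [p]).flatMap (fun p => [p.1, p.2]) =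
        sols.flatMap (fun p => [p.1, p.2]) ++ [p.1, p.2] := by
      simp [List.flatMap_append]
    rw [hflat]
    have hlenInt : PySem.List.len (sols.flatMap (fun p => [p.1, p.2]) ++ [p.1, p.2]) =
        2 * (sols.length : Int) + 2 := by
      simp [PySem.List.len_eq, hlen]
      try push_cast
      try ring
    rw [hlenInt]
    have hsplit : PySem.List.pyRange 1 (2 * (sols.length : Int) + 2) 2 =
        PySem.List.pyRange 1 (2 * (sols.length : Int)) 2 ++ [2 * (sols.length : Int) + 1] := by
      rw [PySem.List.pyRange_of_pos _ _ (by norm_num : (0:Int) < 2),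
          PySem.List.pyRange_of_pos _ _ (by norm_num : (0:Int) < 2)]
      have h1 : (if (1:Int) < 2 * (sols.length : Int) + 2 then
          ((2 * (sols.length : Int) + 2 - 1 + 2 - 1) / 2).toNat else 0) = sols.length + 1 := by
        split <;> omega
      have h2 : (if (1:Int) < 2 * (sols.length : Int) then
          ((2 * (sols.length : Int) - 1 + 2 - 1) / 2).toNat else 0) = sols.length := by
        split <;> omega
      rw [h1, h2, List.range_succ, List.map_append]
      congr 1
      have he : (1 : Int) + 2 * (sols.length : Int) = 2 * (sols.length : Int) + 1 := by ring
      simp [he]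
    rw [hsplit, List.foldl_append]
    have hcongr : ∀ (s : PySem.Set String) (i : Int),
        i ∈ PySem.List.pyRange 1 (2 * (sols.length : Int)) 2 →
        (fun themes i =>
          let al := PySem.List.pyGetD (sols.flatMap (fun p => [p.1, p.2]) ++ [p.1, p.2]) i []
          let theme := al.foldl (fun th cb => if cb.2 == false then th ++ [cb.1] else th)
            ([] : List Char)
          PySem.Set.add themes (String.ofList theme)) s i =
        (fun themes i =>
          let al := PySem.List.pyGetD (sols.flatMap (fun p => [p.1, p.2])) i []
          let theme := al.foldl (fun th cb => if cb.2 == false then th ++ [cb.1] else th)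
            ([] : List Char)
          PySem.Set.add themes (String.ofList theme)) s i := by
      intro s i hi
      have hmem := (PySem.List.mem_pyRange_iff_of_pos (by norm_num : (0:Int) < 2) i).mp hi
      have h0 : 0 ≤ i := by omega
      have hlt : i < ((sols.flatMap (fun p => [p.1, p.2])).length : Int) := by
        rw [hlen]; push_cast; omega
      dsimp only
      rw [PySem.List.pyGetD_eq_getElem _ _ h0
            (by rw [List.length_append, hlen]; push_cast; omega),
          PySem.List.pyGetD_eq_getElem _ _ h0 hlt,
          List.getElem_append_left (by omega)]
    have hfc := PySem.List.foldl_congr_mem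
      (l := PySem.List.pyRange 1 (2 * (sols.length : Int)) 2) (init := init)
      (f := fun themes i =>
        let al := PySem.List.pyGetD (sols.flatMap (fun p => [p.1, p.2]) ++ [p.1, p.2]) i []
        let theme := al.foldl (fun th cb => if cb.2 == false then th ++ [cb.1] else th)
          ([] : List Char)
        PySem.Set.add themes (String.ofList theme))
      (g := fun themes i =>
        let al := PySem.List.pyGetD (sols.flatMap (fun p => [p.1, p.2])) i []
        let theme := al.foldl (fun th cb => if cb.2 == false then th ++ [cb.1] else th)
          ([] : List Char)
        PySem.Set.add themes (String.ofList theme))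
      hcongr
    rw [hfc]
    have hlen2 : PySem.List.len (sols.flatMap (fun p => [p.1, p.2])) = 2 * (sols.length : Int) := by
      simp [PySem.List.len_eq, hlen]
      try push_cast
      try ring
    rw [hlen2] at ih
    rw [ih]
    simp only [List.foldl_cons, List.foldl_nil]
    try dsimp only
    rw [PySem.List.pyGetD_eq_getElem _ _ (by omega)
          (by simp only [List.length_append, List.length_cons, List.length_nil, hlen];
              push_cast; omega),
        List.getElem_append_right (by omega)]
    have hidx : (2 * (sols.length : Int) + 1).toNat - (sols.flatMap (fun p => [p.1, p.2])).length
        = 1 := by omega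
    rw [List.map_append, PySem.Set.update_append]
    simp only [List.map_cons, List.map_nil, PySem.Set.update_cons, PySem.Set.update_nil]
    congr 1
    rw [PySem.List.foldl_append_if]
    simp only [hidx]
    simp [pvTheme]

-- ===== VERDICT (by name: the statement is the Claim_ definition above) =====
theorem GetThemes_spec : Claim_equal_GetThemes := by
  intro dist form _
  unfold Spec_GetThemes GetThemes GetThemes_alt
  dsimp only
  rw [pv_postprocess]
  rw [pvGoB_eq dist.toList form.toList (dist.toList.length + form.toList.length)
        dist.toList.length form.toList.length le_rfl le_rfl le_rfl]
  rw [List.take_length, List.take_length, PySem.Set.ofList_ofList, PySem.Set.update_empty]
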